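-- pv_equiv track=rewrite | github.com/xuanthai2110/datalogger_renew_2026 | backend/drivers/sungrow_sg110cx.py | _group_contiguous
-- ===== SOURCE A (Python) =====
-- def _group_contiguous(regs: list[dict]) -> list[list[dict]]:
--     if not regs:
--         return []
--
--     ordered_regs = sorted(regs, key=lambda reg: reg["address"])
--     groups = [[ordered_regs[0]]]
--
--     for reg in ordered_regs[1:]:
--         previous = groups[-1][-1]
--         previous_end = previous["address"] + previous["length"]
--         if reg["address"] == previous_end:
--             groups[-1].append(reg)
--         else:
--             groups.append([reg])
--
--     return groups
-- ===== SOURCE B (Python) =====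
-- def _group_contiguous(regs: list[dict]) -> list[list[dict]]:
--     ordered_regs = sorted(regs, key=lambda reg: reg["address"])
--     groups = []
--     for reg in reversed(ordered_regs):
--         if groups and groups[0][0]["address"] == reg["address"] + reg["length"]:
--             groups[0] = [reg] + groups[0]
--         else:
--             groups = [[reg]] + groups
--     return groups
-- ===== Notes on version B (the rewrite author's own statement) =====
-- stated objective: alternative
-- what changed: B builds the groups back-to-front: it scans the sorted registers in reverse order and prepends each register to the current first group when contiguous with its head (a foldr), instead of A's forward scan appending register-by-register to the last group.
import Mathlib
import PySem

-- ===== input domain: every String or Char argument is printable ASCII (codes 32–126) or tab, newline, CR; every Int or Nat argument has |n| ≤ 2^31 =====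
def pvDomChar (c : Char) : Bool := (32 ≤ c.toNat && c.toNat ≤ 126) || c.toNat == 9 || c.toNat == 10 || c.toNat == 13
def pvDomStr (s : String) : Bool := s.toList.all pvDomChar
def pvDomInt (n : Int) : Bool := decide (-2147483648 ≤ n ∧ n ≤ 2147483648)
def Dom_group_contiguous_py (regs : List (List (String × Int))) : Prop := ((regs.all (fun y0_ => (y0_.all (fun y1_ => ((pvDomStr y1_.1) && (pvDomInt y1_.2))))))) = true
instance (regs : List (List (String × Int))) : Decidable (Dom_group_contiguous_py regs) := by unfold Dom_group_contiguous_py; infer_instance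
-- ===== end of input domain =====

-- B groups the sorted registers back-to-front with a reverse scan (foldr, prepending to the
-- first group) instead of A's forward scan appending to the last group; return values only.


-- ===== PORT A =====
-- reg["address"] / reg["length"]: the dict built from the pair list (later duplicates overwrite),
-- defaulted to 0 — the default is reachable only outside Pre_.
def pvAddr (r : List (String × Int)) : Int := (PySem.Dict.ofList r).getD "address" 0
def pvLen (r : List (String × Int)) : Int := (PySem.Dict.ofList r).getD "length" 0

-- A's loop body: previous = groups[-1][-1]; append to groups[-1] or start a new group.
def pvStepA (groups : List (List (List (String × Int)))) (reg : List (String × Int)) :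
    List (List (List (String × Int))) :=
  let previous := PySem.List.pyGetD (PySem.List.pyGetD groups (-1) []) (-1) []
  let previousEnd := pvAddr previous + pvLen previous
  if pvAddr reg = previousEnd then
    groups.dropLast ++ [PySem.List.pyGetD groups (-1) [] ++ [reg]]
  else
    groups ++ [[reg]]

def group_contiguous_py (regs : List (List (String × Int))) : List (List (List (String × Int))) :=
  if regs = [] then []
  else
    let ordered := PySem.List.sorted regs (fun reg => pvAddr reg)
    (PySem.List.slice ordered (some 1) none).foldl pvStepA [[PySem.List.pyGetD ordered 0 []]]

-- ===== PORT B =====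
-- B's loop body (for reg in reversed(ordered): … = a foldr over ordered): prepend reg to the
-- first group when contiguous with its head, else open a new first group.
def pvStepB (reg : List (String × Int)) (groups : List (List (List (String × Int)))) :
    List (List (List (String × Int))) :=
  match groups with
  | [] => [[reg]]
  | g :: gs =>
    if pvAddr (g.headD []) = pvAddr reg + pvLen reg then (reg :: g) :: gs
    else [reg] :: g :: gs

def group_contiguous_py_alt (regs : List (List (String × Int))) : List (List (List (String × Int))) :=
  (PySem.List.sorted regs (fun reg => pvAddr reg)).foldr pvStepB []

-- ===== PRECONDITION & SPEC =====
-- Pre_ holds exactly where Python A returns: every register has an "address" key, and a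
-- register may lack "length" only when it is the sorted-last one (maximal address, no later
-- register of equal address) — on every other input A raises KeyError (and so does B).
def Pre_group_contiguous_py (regs : List (List (String × Int))) : Prop :=
  (∀ r ∈ regs, (PySem.Dict.ofList r).contains "address" = true) ∧
  ∀ i, (hi : i < regs.length) → (PySem.Dict.ofList regs[i]).contains "length" = false →
    (∀ j, (hj : j < regs.length) → j ≠ i → (PySem.Dict.ofList regs[j]).contains "length" = true) ∧
    (∀ j, (hj : j < regs.length) → pvAddr regs[j] ≤ pvAddr regs[i]) ∧
    (∀ j, (hj : j < regs.length) → i < j → pvAddr regs[j] ≠ pvAddr regs[i])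
instance (regs : List (List (String × Int))) : Decidable (Pre_group_contiguous_py regs) := by
  unfold Pre_group_contiguous_py; infer_instance

def pvWitness_group_contiguous_py : (List (List (String × Int))) :=
  [[("address", 0), ("length", 2)], [("address", 2), ("length", 1)], [("address", 9), ("length", 1)]]

def Spec_group_contiguous_py (regs : List (List (String × Int))) (out : List (List (List (String × Int)))) : Prop := out = group_contiguous_py_alt regs
instance (regs : List (List (String × Int))) (out : List (List (List (String × Int)))) : Decidable (Spec_group_contiguous_py regs out) := by unfold Spec_group_contiguous_py; infer_instance

-- ===== CLAIM (what is proved, stated in full; the proofs are below) =====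
def Claim_equal_group_contiguous_py : Prop := ∀ (regs : List (List (String × Int))), Dom_group_contiguous_py regs → Pre_group_contiguous_py regs → Spec_group_contiguous_py regs (group_contiguous_py regs)

-- ===== LEMMAS AND PROOFS =====

-- A's forward grouping of a run, with the current (nonempty) last group carried explicitly.
def pvGlue : List (List (String × Int)) → List (List (String × Int)) → List (List (List (String × Int)))
  | g, [] => [g]
  | g, r :: rs =>
    let x := PySem.List.pyGetD g (-1) []
    if pvAddr r = pvAddr x + pvLen x then pvGlue (g ++ [r]) rs
    else g :: pvGlue [r] rs

theorem foldl_stepA (l : List (List (String × Int)))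
    (gs : List (List (List (String × Int)))) (p : List (List (String × Int))) (x : List (String × Int)) :
    List.foldl pvStepA (gs ++ [p ++ [x]]) l = gs ++ pvGlue (p ++ [x]) l := by
  induction l generalizing gs p x with
  | nil => simp [pvGlue]
  | cons r rs ih =>
    rw [List.foldl_cons]
    show List.foldl pvStepA (pvStepA (gs ++ [p ++ [x]]) r) rs = _
    rw [pvGlue]
    simp only [pvStepA, PySem.List.pyGetD_neg_one_append_singleton, List.dropLast_concat]
    by_cases hc : pvAddr r = pvAddr x + pvLen x
    · simp only [if_pos hc]
      exact ih gs (p ++ [x]) r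
    · simp only [if_neg hc]
      have h2 := ih (gs ++ [p ++ [x]]) [] r
      simp only [List.nil_append] at h2
      rw [show gs ++ [p ++ [x]] ++ [[r]] = (gs ++ [p ++ [x]]) ++ [[r]] by simp, h2]
      simp

theorem foldr_stepB_cons (l : List (List (String × Int))) (r : List (String × Int)) :
    ∃ g' gs, List.foldr pvStepB [] (r :: l) = (r :: g') :: gs := by
  rw [List.foldr_cons]
  cases h : List.foldr pvStepB [] l with
  | nil => exact ⟨[], [], rfl⟩
  | cons g gs =>
    show ∃ g' gs', (if pvAddr (g.headD []) = pvAddr r + pvLen r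
        then (r :: g) :: gs else [r] :: g :: gs) = (r :: g') :: gs'
    by_cases hc : pvAddr (g.headD []) = pvAddr r + pvLen r
    · exact ⟨g, gs, by rw [if_pos hc]⟩
    · exact ⟨[], g :: gs, by rw [if_neg hc]⟩

theorem glue_foldr (l : List (List (String × Int)))
    (p : List (List (String × Int))) (x : List (String × Int))
    (h : List (List (String × Int))) (t : List (List (List (String × Int))))
    (hB : List.foldr pvStepB [] (x :: l) = h :: t) :
    pvGlue (p ++ [x]) l = (p ++ h) :: t := by
  induction l generalizing p x h t with
  | nil =>
    simp only [List.foldr_cons, List.foldr_nil, pvStepB] at hB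
    obtain ⟨rfl, rfl⟩ : [x] = h ∧ ([] : List (List (List (String × Int)))) = t := by
      constructor <;> injection hB
    simp [pvGlue]
  | cons r rs ih =>
    obtain ⟨g', gs, hrec⟩ := foldr_stepB_cons rs r
    rw [List.foldr_cons, hrec] at hB
    rw [show pvStepB x ((r :: g') :: gs) = (if pvAddr ((r :: g').headD []) = pvAddr x + pvLen x
        then (x :: r :: g') :: gs else [x] :: (r :: g') :: gs) from rfl, List.headD_cons] at hB
    rw [pvGlue]
    simp only [PySem.List.pyGetD_neg_one_append_singleton]
    by_cases hc : pvAddr r = pvAddr x + pvLen x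
    · rw [if_pos hc]
      rw [if_pos hc] at hB
      obtain ⟨rfl, rfl⟩ : x :: r :: g' = h ∧ gs = t := by
        constructor <;> injection hB
      rw [ih (p ++ [x]) r (r :: g') gs hrec]
      simp
    · rw [if_neg hc]
      rw [if_neg hc] at hB
      obtain ⟨rfl, rfl⟩ : [x] = h ∧ (r :: g') :: gs = t := by
        constructor <;> injection hB
      have h2 := ih [] r (r :: g') gs hrec
      simp only [List.nil_append] at h2
      rw [h2]

-- ===== VERDICT (by name: the statement is the Claim_ definition above) =====
theorem group_contiguous_py_spec : Claim_equal_group_contiguous_py := by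
  intro regs _ _
  unfold Spec_group_contiguous_py group_contiguous_py group_contiguous_py_alt
  by_cases hr : regs = []
  · subst hr; simp [PySem.List.sorted]
  · rw [if_neg hr]
    cases hs : PySem.List.sorted regs (fun reg => pvAddr reg) with
    | nil => exact absurd ((PySem.List.sorted_eq_nil_iff regs _ false).mp hs) hr
    | cons x l =>
      show List.foldl pvStepA [[PySem.List.pyGetD (x :: l) 0 []]]
          (PySem.List.slice (x :: l) (some 1) none) = List.foldr pvStepB [] (x :: l)
      rw [PySem.List.slice_from_one, List.tail_cons, PySem.List.pyGetD_zero_cons]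
      obtain ⟨g', gs, hB⟩ := foldr_stepB_cons l x
      have hA := foldl_stepA l [] [] x
      simp only [List.nil_append] at hA
      have hG := glue_foldr l [] x (x :: g') gs hB
      simp only [List.nil_append] at hG
      rw [hA, hG, hB]
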